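-- pv_equiv track=rewrite | github.com/Spruked/Digital-Assets-Logistics-System-DALS | iss_module/utils/serial_assignment.py | generate_glyph
-- ===== SOURCE A (Python) =====
-- GLYPH_CHARACTERS = "ABCDEFGHJKLMNPQRSTUVWXYZ23456789" # Custom set to avoid confusing characters
--
-- def generate_glyph(serial_components: str) -> str:
--     """Generates a 3-character verification glyph based on the input string."""
--     ascii_sum = sum(ord(c) for c in serial_components)
--     glyph = ""
--     for i in range(3):
--         index = (ascii_sum + i) % len(GLYPH_CHARACTERS)
--         glyph += GLYPH_CHARACTERS[index]
--         ascii_sum = (ascii_sum * 7) + 1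
--     return glyph
-- ===== SOURCE B (Python) =====
-- GLYPH_CHARACTERS = "ABCDEFGHJKLMNPQRSTUVWXYZ23456789" # Custom set to avoid confusing characters
--
-- def generate_glyph(serial_components: str) -> str:
--     """Generates a 3-character verification glyph based on the input string."""
--     s = sum(map(ord, serial_components))
--     L = len(GLYPH_CHARACTERS)
--     return (GLYPH_CHARACTERS[s % L]
--             + GLYPH_CHARACTERS[(7 * s + 2) % L]
--             + GLYPH_CHARACTERS[(49 * s + 10) % L])
-- ===== Notes on version B (the rewrite author's own statement) =====
-- stated objective: simpler
-- what changed: Replaced the 3-step loop mutating an accumulator (s -> 7s+1) with closed-form index expressions s%L, (7s+2)%L, (49s+10)%L derived from the recurrence, returning the concatenation directly (map(ord) sum + no loop/string accumulation).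
import Mathlib
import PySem

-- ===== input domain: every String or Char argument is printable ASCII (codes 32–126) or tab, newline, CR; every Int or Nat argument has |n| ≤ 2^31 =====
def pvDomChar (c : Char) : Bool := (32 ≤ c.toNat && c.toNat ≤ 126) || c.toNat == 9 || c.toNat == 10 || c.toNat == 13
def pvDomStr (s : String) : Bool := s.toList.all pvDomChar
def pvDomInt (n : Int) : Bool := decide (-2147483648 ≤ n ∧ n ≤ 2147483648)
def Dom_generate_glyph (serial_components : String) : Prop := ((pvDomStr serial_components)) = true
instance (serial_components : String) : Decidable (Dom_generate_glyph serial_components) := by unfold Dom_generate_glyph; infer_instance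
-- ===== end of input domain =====

-- B replaces A's 3-iteration accumulator loop with closed-form index arithmetic; same values, simpler.
-- ===== PORT A =====
def GLYPH_CHARACTERS : String := "ABCDEFGHJKLMNPQRSTUVWXYZ23456789"

def generate_glyph (serial_components : String) : String :=
  let ascii_sum : Int := serial_components.toList.foldl (fun a c => a + (c.toNat : Int)) 0
  -- for i in range(3): index = (ascii_sum + i) % len; glyph += G[index]; ascii_sum = ascii_sum*7 + 1
  -- G[index] is always in range; .getD 'A' only totalizes the lookup
  let st := (PySem.List.pyRange 0 3 1).foldl
    (fun (st : Int × String) (i : Int) =>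
      let index := PySem.Int.mod (st.1 + i) (PySem.Str.len GLYPH_CHARACTERS)
      ((st.1 * 7) + 1, st.2 ++ ((PySem.Str.pyGet? GLYPH_CHARACTERS index).getD 'A').toString))
    (ascii_sum, "")
  st.2

-- ===== PORT B =====
def generate_glyph_alt (serial_components : String) : String :=
  let s : Int := serial_components.toList.foldl (fun a c => a + (c.toNat : Int)) 0
  let L := PySem.Str.len GLYPH_CHARACTERS
  ((PySem.Str.pyGet? GLYPH_CHARACTERS (PySem.Int.mod s L)).getD 'A').toString
    ++ ((PySem.Str.pyGet? GLYPH_CHARACTERS (PySem.Int.mod (7 * s + 2) L)).getD 'A').toString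
    ++ ((PySem.Str.pyGet? GLYPH_CHARACTERS (PySem.Int.mod (49 * s + 10) L)).getD 'A').toString

-- ===== PRECONDITION & SPEC =====
def Spec_generate_glyph (serial_components : String) (out : String) : Prop := out = generate_glyph_alt serial_components
instance (serial_components : String) (out : String) : Decidable (Spec_generate_glyph serial_components out) := by unfold Spec_generate_glyph; infer_instance

-- ===== CLAIM (what is proved, stated in full; the proofs are below) =====
def Claim_equal_generate_glyph : Prop := ∀ (serial_components : String), Dom_generate_glyph serial_components → Spec_generate_glyph serial_components (generate_glyph serial_components)

-- ===== LEMMAS AND PROOFS =====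

-- ===== VERDICT (by name: the statement is the Claim_ definition above) =====
theorem generate_glyph_spec : Claim_equal_generate_glyph := by
  intro sc _
  unfold Spec_generate_glyph generate_glyph generate_glyph_alt
  generalize sc.toList.foldl (fun a c => a + (c.toNat : Int)) 0 = s
  rw [show PySem.List.pyRange 0 3 1 = [0, 1, 2] from by decide]
  simp only [List.foldl, PySem.Int.mod, PySem.Str.len, PySem.Str.pyGet?]
  ring_nf
  simp only [String.empty_append]
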